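-- pv_equiv track=rewrite | github.com/specula-org/SysMoBench | tla_eval/evaluation/semantics/manual_invariant_evaluator.py | _add_invariant_to_spec
-- ===== SOURCE A (Python) =====
-- def _add_invariant_to_spec(tla_content: str, invariant_definition: str, invariant_name: str) -> str:
--     """Add a single invariant definition to the TLA+ specification"""
--
--     lines = tla_content.split('\n')
--     result_lines = []
--
--     # Find the insertion point (before the closing ====)
--     invariant_inserted = False
--
--     for i, line in enumerate(lines):
--         # Check if this is the final separator line (could be ==== or longer ========...)
--         if line.strip().startswith('====') and i == len(lines) - 1:
--             # Insert invariant before final separator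
--             if not invariant_inserted:
--                 result_lines.append('')
--                 result_lines.append(f'\\* Manual invariant: {invariant_name}')
--                 result_lines.append(invariant_definition)
--                 result_lines.append('')
--                 invariant_inserted = True
--
--         result_lines.append(line)
--
--     # If no ==== found, append at the end
--     if not invariant_inserted:
--         result_lines.append('')
--         result_lines.append(f'\\* Manual invariant: {invariant_name}')
--         result_lines.append(invariant_definition)
--
--     return '\n'.join(result_lines)
-- ===== SOURCE B (Python) =====
-- def _add_invariant_to_spec(tla_content: str, invariant_definition: str, invariant_name: str) -> str:
--     """Add a single invariant definition to the TLA+ specification (loop-free)."""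
--     lines = tla_content.split('\n')
--     comment = f'\\* Manual invariant: {invariant_name}'
--     if lines[-1].strip().startswith('===='):
--         result = lines[:-1] + ['', comment, invariant_definition, '', lines[-1]]
--     else:
--         result = lines + ['', comment, invariant_definition]
--     return '\n'.join(result)
-- ===== Notes on version B (the rewrite author's own statement) =====
-- stated objective: simpler
-- what changed: Replaces the per-line loop with its enumerate index and the invariant_inserted flag by a single check of the last line (the loop condition can only fire there), building the result by list concatenation in one of two closed-form cases.
import Mathlib
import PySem

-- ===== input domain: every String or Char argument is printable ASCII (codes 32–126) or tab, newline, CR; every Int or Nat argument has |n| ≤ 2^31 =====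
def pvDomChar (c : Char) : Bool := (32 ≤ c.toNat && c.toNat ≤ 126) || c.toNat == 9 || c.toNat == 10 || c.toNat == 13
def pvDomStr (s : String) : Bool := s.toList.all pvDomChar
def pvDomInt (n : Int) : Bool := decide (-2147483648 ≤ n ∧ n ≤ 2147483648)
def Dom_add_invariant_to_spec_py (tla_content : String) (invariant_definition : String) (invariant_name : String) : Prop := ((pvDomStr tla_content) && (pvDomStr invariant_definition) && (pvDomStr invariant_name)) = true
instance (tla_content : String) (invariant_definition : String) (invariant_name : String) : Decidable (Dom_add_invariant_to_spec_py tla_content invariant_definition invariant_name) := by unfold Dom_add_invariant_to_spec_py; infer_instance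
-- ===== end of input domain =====

-- B replaces A's per-line loop and invariant_inserted flag by a single check of the
-- last line (the loop's condition can only fire there): simpler, same output.


-- ===== PORT A =====
-- the body of A's for-loop, as a step function over the state (result_lines, invariant_inserted)
def pvStepA (m : Int) (invariant_definition : String) (invariant_name : String)
    (st : List String × Bool) (p : Int × String) : List String × Bool :=
  if PySem.Str.startswith (PySem.Str.strip p.2) "====" && (p.1 == m) then
    ((if !st.2 then
        st.1 ++ ["", "\\* Manual invariant: " ++ invariant_name, invariant_definition, ""]
      else st.1) ++ [p.2], true)
  else (st.1 ++ [p.2], st.2)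

def add_invariant_to_spec_py (tla_content : String) (invariant_definition : String) (invariant_name : String) : String :=
  -- '\n' is a non-empty separator, so split? is always `some`
  let lines := (PySem.Str.split? tla_content "\n").getD []
  let r := (PySem.List.enumerate lines 0).foldl
            (pvStepA ((lines.length : Int) - 1) invariant_definition invariant_name) ([], false)
  let result_lines :=
    if !r.2 then r.1 ++ ["", "\\* Manual invariant: " ++ invariant_name, invariant_definition]
    else r.1
  PySem.Str.join "\n" result_lines

-- ===== PORT B =====
def add_invariant_to_spec_py_alt (tla_content : String) (invariant_definition : String) (invariant_name : String) : String :=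
  let lines := (PySem.Str.split? tla_content "\n").getD []
  let comment := "\\* Manual invariant: " ++ invariant_name
  let lastLine := PySem.List.pyGetD lines (-1) ""   -- lines[-1]; split's result is never empty
  let result :=
    if PySem.Str.startswith (PySem.Str.strip lastLine) "====" then
      PySem.List.slice lines none (some (-1)) ++ ["", comment, invariant_definition, "", lastLine]
    else lines ++ ["", comment, invariant_definition]
  PySem.Str.join "\n" result

-- ===== PRECONDITION & SPEC =====
def Spec_add_invariant_to_spec_py (tla_content : String) (invariant_definition : String) (invariant_name : String) (out : String) : Prop := out = add_invariant_to_spec_py_alt tla_content invariant_definition invariant_name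
instance (tla_content : String) (invariant_definition : String) (invariant_name : String) (out : String) : Decidable (Spec_add_invariant_to_spec_py tla_content invariant_definition invariant_name out) := by unfold Spec_add_invariant_to_spec_py; infer_instance

-- ===== CLAIM (what is proved, stated in full; the proofs are below) =====
def Claim_equal_add_invariant_to_spec_py : Prop := ∀ (tla_content : String) (invariant_definition : String) (invariant_name : String), Dom_add_invariant_to_spec_py tla_content invariant_definition invariant_name → Spec_add_invariant_to_spec_py tla_content invariant_definition invariant_name (add_invariant_to_spec_py tla_content invariant_definition invariant_name)

-- ===== LEMMAS AND PROOFS =====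

-- A's loop never fires its insertion branch while the index differs from m
theorem pvFoldA_no_trigger (d nm : String) (m : Int) :
    ∀ (xs : List String) (s : Int) (res : List String) (ins : Bool),
      (∀ p ∈ PySem.List.enumerate xs s, p.1 ≠ m) →
      (PySem.List.enumerate xs s).foldl (pvStepA m d nm) (res, ins) = (res ++ xs, ins) := by
  intro xs
  induction xs with
  | nil => intro s res ins _; simp [PySem.List.enumerate_nil]
  | cons x xs ih =>
    intro s res ins h
    rw [PySem.List.enumerate_cons]
    have hs : s ≠ m := h (s, x) (by rw [PySem.List.enumerate_cons]; exact List.mem_cons_self ..)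
    simp only [List.foldl_cons, pvStepA]
    rw [if_neg (by simp [hs])]
    rw [ih (s + 1) (res ++ [x]) ins (fun p hp => h p (by rw [PySem.List.enumerate_cons]; exact List.mem_cons_of_mem _ hp))]
    simp

-- the list built by A equals the list built by B, for any line list
set_option maxHeartbeats 1000000 in
theorem pvResult_eq (d nm : String) (lines : List String) :
    (if !((PySem.List.enumerate lines 0).foldl
            (pvStepA ((lines.length : Int) - 1) d nm) ([], false)).2 then
       ((PySem.List.enumerate lines 0).foldl
            (pvStepA ((lines.length : Int) - 1) d nm) ([], false)).1
         ++ ["", "\\* Manual invariant: " ++ nm, d]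
     else ((PySem.List.enumerate lines 0).foldl
            (pvStepA ((lines.length : Int) - 1) d nm) ([], false)).1)
    = (if PySem.Str.startswith (PySem.Str.strip (PySem.List.pyGetD lines (-1) "")) "====" then
         PySem.List.slice lines none (some (-1))
           ++ ["", "\\* Manual invariant: " ++ nm, d, "", PySem.List.pyGetD lines (-1) ""]
       else lines ++ ["", "\\* Manual invariant: " ++ nm, d]) := by
  rcases lines.eq_nil_or_concat with h | ⟨init, lastLine, h⟩
  · subst h
    rw [if_neg (by decide : ¬ PySem.Str.startswith (PySem.Str.strip (PySem.List.pyGetD ([] : List String) (-1) "")) "====" = true)]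
    simp [PySem.List.enumerate_nil]
  · simp only [List.concat_eq_append] at h
    subst h
    have hm : ((init ++ [lastLine]).length : Int) - 1 = (init.length : Int) := by
      simp
    rw [hm, PySem.List.enumerate_append, List.foldl_append]
    rw [pvFoldA_no_trigger d nm (init.length : Int) init 0 [] false
        (by
          intro p hp
          rw [PySem.List.mem_enumerate_iff] at hp
          obtain ⟨k, hk, rfl⟩ := hp
          show (0 : Int) + (k : Int) ≠ (init.length : Int)
          omega)]
    simp only [PySem.List.enumerate_cons, PySem.List.enumerate_nil, List.nil_append,
      List.foldl_cons, List.foldl_nil, pvStepA, PySem.List.pyGetD_neg_one_append_singleton]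
    by_cases hsw : PySem.Chars.startswith (PySem.Chars.strip lastLine.toList) ['=', '=', '=', '='] = true
    · have hsl : PySem.List.slice (init ++ [lastLine]) none (some (-1)) = init := by
        simp [pysem]
      simp [PySem.Str.startswith_eq, hsw, hsl]
    · simp [PySem.Str.startswith_eq, hsw]

-- ===== VERDICT (by name: the statement is the Claim_ definition above) =====
theorem add_invariant_to_spec_py_spec : Claim_equal_add_invariant_to_spec_py := by
  intro t d nm _
  unfold Spec_add_invariant_to_spec_py add_invariant_to_spec_py add_invariant_to_spec_py_alt
  exact congrArg (PySem.Str.join "\n") (pvResult_eq d nm ((PySem.Str.split? t "\n").getD []))
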